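-- pv_equiv track=rewrite | github.com/walkerlab/orcapod-python | src/orcabridge/stream_utils.py | join_tags
-- ===== SOURCE A (Python) =====
-- from typing import List, Dict, Optional, Any, TypeVar, Set, Union, Sequence, Mapping
--
-- K = TypeVar('K')
--
-- V = TypeVar('V')
--
-- def join_tags(tag1: Mapping[K, V], tag2: Mapping[K, V]) -> Optional[Mapping[K, V]]:
--     """
--     Joins two tags together. If the tags have the same key, the value must be the same or None will be returned.
--     """
--     joined_tag = dict(tag1)
--     for k, v in tag2.items():
--         if k in joined_tag and joined_tag[k] != v:
--             # Detected a mismatch in the tags, return None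
--             return None
--         else:
--             joined_tag[k] = v
--     return joined_tag
-- ===== SOURCE B (Python) =====
-- def join_tags(tag1, tag2):
--     """
--     Joins two tags together. If the tags have the same key, the value must be
--     the same or None will be returned.
--     """
--     items = set(tag1.items()) | set(tag2.items())
--     if len({k for k, _ in items}) < len(items):
--         return None
--     return {**tag1, **tag2}
-- ===== Notes on version B (the rewrite author's own statement) =====
-- stated objective: alternative
-- what changed: Conflict detection is done by cardinality: take the set union of the two item sets and compare the number of distinct keys with the number of distinct (key, value) pairs -- a key is conflicting iff it appears with two different values, so no per-key lookups or value comparisons are performed; the merged dict is then built separately as {**tag1, **tag2}.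
import Mathlib
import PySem

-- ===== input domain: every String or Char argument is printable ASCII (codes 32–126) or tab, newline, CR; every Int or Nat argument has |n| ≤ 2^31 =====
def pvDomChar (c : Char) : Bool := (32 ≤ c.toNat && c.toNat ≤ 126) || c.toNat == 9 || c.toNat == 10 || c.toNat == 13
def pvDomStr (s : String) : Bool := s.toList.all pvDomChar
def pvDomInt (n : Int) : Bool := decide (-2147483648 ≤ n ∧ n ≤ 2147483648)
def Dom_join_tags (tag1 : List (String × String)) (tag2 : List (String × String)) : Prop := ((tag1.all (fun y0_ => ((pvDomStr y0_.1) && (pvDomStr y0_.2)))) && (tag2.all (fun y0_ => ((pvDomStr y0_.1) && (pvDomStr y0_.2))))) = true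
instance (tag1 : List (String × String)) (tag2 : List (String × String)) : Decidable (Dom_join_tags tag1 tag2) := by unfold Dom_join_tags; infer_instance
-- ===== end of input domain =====

-- B detects conflicts by cardinality (distinct keys vs distinct (key,value) pairs of the
-- union of the item sets), with no value comparisons, then merges separately (alternative).


-- ===== PORT A =====
-- the 'for k, v in tag2.items():' loop with its early 'return None'
def joinLoopA (joined : PySem.Dict String String) : List (String × String) → Option (PySem.Dict String String)
  | [] => some joined
  | (k, v) :: rest =>
    if joined.contains k && (joined.get? k != some v) then none
    else joinLoopA (joined.insert k v) rest

def join_tags (tag1 : List (String × String)) (tag2 : List (String × String)) : Option (List (String × String)) :=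
  (joinLoopA (PySem.Dict.ofList tag1) (PySem.Dict.ofList tag2).items).map (fun d => d.items)

-- ===== PORT B =====
def join_tags_alt (tag1 : List (String × String)) (tag2 : List (String × String)) : Option (List (String × String)) :=
  let d1 := PySem.Dict.ofList tag1
  let d2 := PySem.Dict.ofList tag2
  -- items = set(tag1.items()) | set(tag2.items())
  let items : PySem.Set (String × String) :=
    PySem.Set.union (PySem.Set.ofList d1.items) (PySem.Set.ofList d2.items)
  -- {k for k, _ in items}: the set is iterated only to BUILD another set, whose len alone
  -- is consumed — order-independent, so this is exact
  let keySet : PySem.Set String := PySem.Set.ofList (items.map Prod.fst)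
  if PySem.Set.len keySet < PySem.Set.len items then none
  else some ((d1.update d2.items).items)

-- ===== PRECONDITION & SPEC =====
def Spec_join_tags (tag1 : List (String × String)) (tag2 : List (String × String)) (out : Option (List (String × String))) : Prop := out = join_tags_alt tag1 tag2
instance (tag1 : List (String × String)) (tag2 : List (String × String)) (out : Option (List (String × String))) : Decidable (Spec_join_tags tag1 tag2 out) := by unfold Spec_join_tags; infer_instance

-- ===== CLAIM (what is proved, stated in full; the proofs are below) =====
def Claim_equal_join_tags : Prop := ∀ (tag1 : List (String × String)) (tag2 : List (String × String)), Dom_join_tags tag1 tag2 → Spec_join_tags tag1 tag2 (join_tags tag1 tag2)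

-- ===== LEMMAS AND PROOFS =====

lemma any_congr_mem {α : Type} {l : List α} {p q : α → Bool}
    (h : ∀ a ∈ l, p a = q a) : l.any p = l.any q := by
  induction l with
  | nil => rfl
  | cons a t ih => simp_all [List.any_cons]

-- A's loop, characterised: scan for a conflict against the ORIGINAL dict, else fold the inserts.
lemma joinLoopA_eq (l : List (String × String)) (d : PySem.Dict String String)
    (hn : (l.map Prod.fst).Nodup) :
    joinLoopA d l =
      if l.any (fun p => d.contains p.1 && (d.get? p.1 != some p.2)) then none
      else some (d.update l) := by
  induction l generalizing d with
  | nil => rfl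
  | cons hd t ih =>
    obtain ⟨k, v⟩ := hd
    simp only [List.map_cons, List.nodup_cons] at hn
    by_cases hc : (d.contains k && (d.get? k != some v)) = true
    · simp [joinLoopA, hc]
    · have hrest : t.any (fun p => (d.insert k v).contains p.1 && ((d.insert k v).get? p.1 != some p.2))
          = t.any (fun p => d.contains p.1 && (d.get? p.1 != some p.2)) := by
        refine any_congr_mem (fun p hp => ?_)
        have hne : p.1 ≠ k := fun h => hn.1 (h ▸ List.mem_map_of_mem hp)
        have hb : (p.1 == k) = false := beq_eq_false_iff_ne.mpr hne
        rw [PySem.Dict.contains_insert, PySem.Dict.get?_insert]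
        simp [hne, hb]
      simp only [joinLoopA, hc, List.any_cons, Bool.or_eq_true]
      rw [ih _ hn.2, hrest]
      simp only [Bool.false_eq_true, false_or, PySem.Dict.update, if_false, List.foldl_cons]

-- set(ys) has fewer elements than ys exactly when ys has a duplicate
lemma len_ofList_lt_iff {α : Type} [BEq α] [LawfulBEq α] (ys : List α) :
    (PySem.Set.ofList ys).length < ys.length ↔ ¬ ys.Nodup := by
  constructor
  · intro h hnd
    rw [PySem.Set.ofList_eq_self_of_nodup ys hnd] at h
    exact lt_irrefl _ h
  · intro h
    induction ys with
    | nil => exact absurd List.nodup_nil h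
    | cons x xs ih =>
      rw [PySem.Set.ofList_cons]
      simp only [List.length_cons, Nat.succ_lt_succ_iff]
      rw [List.nodup_cons] at h
      push Not at h
      by_cases hx : x ∈ xs
      · have hx' : x ∈ PySem.Set.ofList xs := (PySem.Set.mem_ofList xs x).mpr hx
        have h1 : (PySem.Set.discard (PySem.Set.ofList xs) x).length < (PySem.Set.ofList xs).length := by
          have : PySem.Set.discard (PySem.Set.ofList xs) x
              = (PySem.Set.ofList xs).filter (fun y => y != x) := rfl
          rw [this]
          refine List.length_filter_lt_length_iff_exists.mpr ⟨x, hx', by simp⟩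
        exact lt_of_lt_of_le h1 (PySem.Set.length_ofList_le xs)
      · have hnd := h hx
        have h1 : (PySem.Set.discard (PySem.Set.ofList xs) x).length ≤ (PySem.Set.ofList xs).length := by
          have : PySem.Set.discard (PySem.Set.ofList xs) x
              = (PySem.Set.ofList xs).filter (fun y => y != x) := rfl
          rw [this]; exact List.length_filter_le _ _
        exact lt_of_le_of_lt h1 (ih hnd)

-- the duplicate-key criterion on the union of the item sets IS A's conflict condition
lemma cond_iff (tag1 tag2 : List (String × String)) :
    PySem.Set.len (PySem.Set.ofList
        ((PySem.Set.union (PySem.Set.ofList (PySem.Dict.ofList tag1).items)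
            (PySem.Set.ofList (PySem.Dict.ofList tag2).items)).map Prod.fst)) <
      PySem.Set.len (PySem.Set.union (PySem.Set.ofList (PySem.Dict.ofList tag1).items)
          (PySem.Set.ofList (PySem.Dict.ofList tag2).items)) ↔
    (PySem.Dict.ofList tag2).items.any
        (fun p => (PySem.Dict.ofList tag1).contains p.1 &&
                  ((PySem.Dict.ofList tag1).get? p.1 != some p.2)) = true := by
  set d1 := PySem.Dict.ofList tag1 with hd1
  set d2 := PySem.Dict.ofList tag2 with hd2
  have hk1 : (d1.items.map Prod.fst).Nodup := PySem.Dict.nodup_keys_ofList tag1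
  have hk2 : (d2.items.map Prod.fst).Nodup := PySem.Dict.nodup_keys_ofList tag2
  have hn1 : d1.items.Nodup := hk1.of_map
  have hn2 : d2.items.Nodup := hk2.of_map
  set L := PySem.Set.union (PySem.Set.ofList d1.items) (PySem.Set.ofList d2.items) with hL
  have hLnd : L.Nodup := PySem.Set.nodup_union _ _ (PySem.Set.nodup_ofList _)
  have hmemL : ∀ p, p ∈ L ↔ p ∈ d1.items ∨ p ∈ d2.items := by
    intro p
    rw [hL, PySem.Set.mem_union, PySem.Set.mem_ofList, PySem.Set.mem_ofList]
  -- reduce the Int comparison to the duplicate-key criterion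
  have hcast : PySem.Set.len (PySem.Set.ofList (L.map Prod.fst)) < PySem.Set.len L ↔
      (PySem.Set.ofList (L.map Prod.fst)).length < (L.map Prod.fst).length := by
    simp [PySem.Set.len]
  rw [hcast, len_ofList_lt_iff, List.nodup_map_iff_inj_on hLnd]
  push Not
  constructor
  · rintro ⟨p, hp, q, hq, hfst, hne⟩
    -- two distinct pairs with equal keys: one is from tag1, one from tag2
    rw [List.any_eq_true]
    have inj1 : ∀ x ∈ d1.items, ∀ y ∈ d1.items, x.1 = y.1 → x = y :=
      (List.nodup_map_iff_inj_on hn1).mp hk1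
    have inj2 : ∀ x ∈ d2.items, ∀ y ∈ d2.items, x.1 = y.1 → x = y :=
      (List.nodup_map_iff_inj_on hn2).mp hk2
    rcases (hmemL p).mp hp with hp1 | hp2 <;> rcases (hmemL q).mp hq with hq1 | hq2
    · exact absurd (inj1 p hp1 q hq1 hfst) hne
    · -- p from tag1, q from tag2
      refine ⟨q, hq2, ?_⟩
      have hg0 : d1.get? p.1 = some p.2 :=
        PySem.Dict.get?_of_mem_items d1 (by simpa using hp1) hk1
      have hg : d1.get? q.1 = some p.2 := hfst ▸ hg0
      have hco : d1.contains q.1 = true := by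
        rw [PySem.Dict.contains_eq_isSome_get?, hg]; rfl
      have hv : p.2 ≠ q.2 := fun h => hne (Prod.ext hfst h)
      simp [hco, hg, hv]
    · -- q from tag1, p from tag2
      refine ⟨p, hp2, ?_⟩
      have hg0 : d1.get? q.1 = some q.2 :=
        PySem.Dict.get?_of_mem_items d1 (by simpa using hq1) hk1
      have hg : d1.get? p.1 = some q.2 := by rw [hfst]; exact hg0
      have hco : d1.contains p.1 = true := by
        rw [PySem.Dict.contains_eq_isSome_get?, hg]; rfl
      have hv : q.2 ≠ p.2 := fun h => hne (Prod.ext hfst h.symm)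
      simp [hco, hg, hv]
    · exact absurd (inj2 p hp2 q hq2 hfst) hne
  · rw [List.any_eq_true]
    rintro ⟨q, hq2, hcond⟩
    rw [Bool.and_eq_true, bne_iff_ne] at hcond
    obtain ⟨hco, hne⟩ := hcond
    have hs : (d1.get? q.1).isSome := by rw [← PySem.Dict.contains_eq_isSome_get?]; exact hco
    obtain ⟨v, hv⟩ := Option.isSome_iff_exists.mp hs
    have hp1 : (q.1, v) ∈ d1.items := PySem.Dict.mem_items_of_get?_eq_some d1 hv
    refine ⟨(q.1, v), (hmemL _).mpr (Or.inl hp1), q, (hmemL q).mpr (Or.inr hq2), rfl, ?_⟩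
    intro h
    apply hne
    rw [hv, ← h]

-- ===== VERDICT (by name: the statement is the Claim_ definition above) =====
theorem join_tags_spec : Claim_equal_join_tags := by
  intro tag1 tag2 _
  unfold Spec_join_tags join_tags join_tags_alt
  rw [joinLoopA_eq _ _ (PySem.Dict.nodup_keys_ofList tag2)]
  by_cases h : (PySem.Dict.ofList tag2).items.any
      (fun p => (PySem.Dict.ofList tag1).contains p.1 &&
                ((PySem.Dict.ofList tag1).get? p.1 != some p.2)) = true
  · rw [if_pos h, if_pos ((cond_iff tag1 tag2).mpr h)]
    rfl
  · rw [if_neg h, if_neg (fun hc => h ((cond_iff tag1 tag2).mp hc))]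
    rfl
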